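-- pv_equiv track=rewrite | github.com/DrPrettyman/CustomEmbeddingsSearch | src/data/cdp_parser.py | _get_topic_for_question
-- ===== SOURCE A (Python) =====
-- CDP_TOPIC_MAP = {
--     range(1, 4): "governance",  # C1-C3: Introduction, governance
--     range(4, 6): "governance",  # C4-C5: Governance, supply chain engagement
--     range(6, 8): "environmental",  # C6-C7: Environmental performance
--     range(8, 10): "environmental",  # C8-C9: Energy, additional metrics
--     range(10, 13): "environmental",  # C10-C12: Verification, carbon pricing, engagement
--     range(13, 20): "environmental",  # C13+: Additional
-- }
--
-- def _get_topic_for_question(q_id: str) -> str: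
--     """Map a CDP question ID to an ESG topic."""
--     try:
--         module_num = int(q_id.split(".")[0])
--         for num_range, topic in CDP_TOPIC_MAP.items():
--             if module_num in num_range:
--                 return topic
--     except (ValueError, IndexError):
--         pass
--     return "unknown"
-- ===== SOURCE B (Python) =====
-- def _get_topic_for_question(q_id: str) -> str:
--     """Map a CDP question ID to an ESG topic."""
--     try:
--         module_num = int(q_id.split(".")[0])
--     except ValueError:
--         return "unknown"
--     if 1 <= module_num <= 5:
--         return "governance"
--     if 6 <= module_num <= 19:
--         return "environmental"
--     return "unknown"
-- ===== Notes on version B (the rewrite author's own statement) =====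
-- stated objective: simpler
-- what changed: Replaced the iteration over the dict of range objects with a closed-form two-comparison chain (1-5 governance, 6-19 environmental, else unknown).
import Mathlib
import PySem

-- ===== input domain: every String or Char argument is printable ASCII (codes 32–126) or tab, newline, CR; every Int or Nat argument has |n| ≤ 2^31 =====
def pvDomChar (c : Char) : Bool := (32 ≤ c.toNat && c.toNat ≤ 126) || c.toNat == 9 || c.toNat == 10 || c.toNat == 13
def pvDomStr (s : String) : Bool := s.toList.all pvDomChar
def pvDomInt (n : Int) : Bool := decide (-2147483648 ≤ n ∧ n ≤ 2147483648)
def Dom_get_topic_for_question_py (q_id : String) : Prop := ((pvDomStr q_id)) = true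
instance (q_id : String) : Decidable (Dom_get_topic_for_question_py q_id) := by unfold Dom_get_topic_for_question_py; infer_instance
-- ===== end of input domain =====

-- B replaces A's iteration over the dict of integer ranges with a closed-form
-- comparison chain (1–5 governance, 6–19 environmental, else unknown); simpler.


-- ===== PORT A =====
-- CDP_TOPIC_MAP as an (lo, hi, topic) list; range(a,b) membership is a ≤ n < b
def pvCdpTopicMap : List (Int × Int × String) :=
  [(1, 4, "governance"), (4, 6, "governance"),
   (6, 8, "environmental"), (8, 10, "environmental"),
   (10, 13, "environmental"), (13, 20, "environmental")]

-- the 'for num_range, topic in …: if module_num in num_range: return topic' loop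
def pvTopicLoop (n : Int) : List (Int × Int × String) → String
  | [] => "unknown"
  | (lo, hi, t) :: rest => if lo ≤ n ∧ n < hi then t else pvTopicLoop n rest

def get_topic_for_question_py (q_id : String) : String :=
  match PySem.Int.ofStr? (((PySem.Str.split? q_id ".").getD []).headD "") with
  | none => "unknown"  -- ValueError caught; split(".")[0] never raises IndexError
  | some n => pvTopicLoop n pvCdpTopicMap

-- ===== PORT B =====
def get_topic_for_question_py_alt (q_id : String) : String :=
  match PySem.Int.ofStr? (((PySem.Str.split? q_id ".").getD []).headD "") with
  | none => "unknown"
  | some n =>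
    if 1 ≤ n ∧ n ≤ 5 then "governance"
    else if 6 ≤ n ∧ n ≤ 19 then "environmental"
    else "unknown"

-- ===== PRECONDITION & SPEC =====
def Spec_get_topic_for_question_py (q_id : String) (out : String) : Prop := out = get_topic_for_question_py_alt q_id
instance (q_id : String) (out : String) : Decidable (Spec_get_topic_for_question_py q_id out) := by unfold Spec_get_topic_for_question_py; infer_instance

-- ===== CLAIM (what is proved, stated in full; the proofs are below) =====
def Claim_equal_get_topic_for_question_py : Prop := ∀ (q_id : String), Dom_get_topic_for_question_py q_id → Spec_get_topic_for_question_py q_id (get_topic_for_question_py q_id)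

-- ===== LEMMAS AND PROOFS =====
theorem pvLoop_eq_chain (n : Int) :
    pvTopicLoop n pvCdpTopicMap =
      (if 1 ≤ n ∧ n ≤ 5 then "governance"
       else if 6 ≤ n ∧ n ≤ 19 then "environmental"
       else "unknown") := by
  simp only [pvCdpTopicMap, pvTopicLoop]
  split_ifs <;> first | rfl | omega

-- ===== VERDICT (by name: the statement is the Claim_ definition above) =====
theorem get_topic_for_question_py_spec : Claim_equal_get_topic_for_question_py := by
  intro q_id _
  unfold Spec_get_topic_for_question_py get_topic_for_question_py get_topic_for_question_py_alt
  cases PySem.Int.ofStr? (((PySem.Str.split? q_id ".").getD []).headD "") with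
  | none => rfl
  | some n => exact pvLoop_eq_chain n
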